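-- pv_equiv track=rewrite | github.com/TangAL0203/API | FashionBeta/classify/attributes/utils/train_Components.py | GetTrueLabel
-- ===== SOURCE A (Python) =====
-- def GetTrueLabel(label):
--     index = []
--     for s_label in label:
--         temp = []
--         temp = [m for m,j in enumerate(s_label) if j==1]
--         index.append(temp)
--     true_label = []
--     for i in index:
--         temp = []
--         for j in i:
--             if j in range(0,14):
--                 temp.append([0, j])
--             elif j in range(14,23,1):
--                 temp.append([1, j-14])
--             elif j in range(23,100,1):
--                 temp.append([2, j-23])
--             elif j in range(100,107,1):
--                 temp.append([3, j-100])
--             elif j in range(107,115,1):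
--                 temp.append([4, j-107])
--             elif j in range(115,141,1):
--                 temp.append([5, j-115])
--             elif j in range(141,162,1):
--                 temp.append([6, j-141])
--             elif j in range(162,169,1):
--                 temp.append([7, j-162])
--             elif j in range(169,184,1):
--                 temp.append([8, j-169])
--             elif j in range(184,223,1):
--                 temp.append([9, j-184])
--             elif j in range(223,235,1):
--                 temp.append([10, j-223])
--             elif j in range(235,245,1):
--                 temp.append([11, j-235])
--             elif j in range(245,254,1):
--                 temp.append([12, j-245])
--             elif j in range(254,262,1):
--                 temp.append([13, j-254])
--             elif j in range(262,273,1):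
--                 temp.append([14, j-262])
--             elif j in range(273,285,1):
--                 temp.append([15, j-273])
--             elif j in range(285,292,1):
--                 temp.append([16, j-285])
--             elif j in range(292,303,1):
--                 temp.append([17, j-292])
--         true_label.append(temp)
--     return true_label
-- ===== SOURCE B (Python) =====
-- _BOUNDS = [0, 14, 23, 100, 107, 115, 141, 162, 169, 184, 223, 235, 245, 254, 262, 273, 285, 292, 303]
--
--
-- def _bisect_right(a, x):
--     lo, hi = 0, len(a)
--     while lo < hi:
--         mid = (lo + hi) // 2
--         if x < a[mid]:
--             hi = mid
--         else:
--             lo = mid + 1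
--     return lo
--
--
-- def GetTrueLabel(label):
--     true_label = []
--     for s_label in label:
--         row = []
--         for j, v in enumerate(s_label):
--             if v == 1 and j < 303:
--                 g = _bisect_right(_BOUNDS, j) - 1
--                 row.append([g, j - _BOUNDS[g]])
--         true_label.append(row)
--     return true_label
-- ===== Notes on version B (the rewrite author's own statement) =====
-- stated objective: alternative
-- what changed: Replaces the 18-branch elif cascade (and the separate index-building pass) with a single pass per row that looks up each set-bit index's group by a hand-written binary search over a 19-entry boundary table.
import Mathlib
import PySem

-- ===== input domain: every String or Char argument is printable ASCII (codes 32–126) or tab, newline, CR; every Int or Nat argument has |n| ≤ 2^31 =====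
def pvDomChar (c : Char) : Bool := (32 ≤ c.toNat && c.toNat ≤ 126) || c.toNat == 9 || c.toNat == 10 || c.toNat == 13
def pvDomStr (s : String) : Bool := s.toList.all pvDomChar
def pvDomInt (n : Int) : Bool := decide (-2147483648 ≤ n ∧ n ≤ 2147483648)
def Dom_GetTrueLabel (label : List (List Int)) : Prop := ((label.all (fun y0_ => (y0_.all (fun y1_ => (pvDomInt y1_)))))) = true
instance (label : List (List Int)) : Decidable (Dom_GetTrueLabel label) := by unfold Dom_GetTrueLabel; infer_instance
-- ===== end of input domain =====

-- B replaces A's 18-branch elif cascade (after a separate index-building pass) with a one-pass-per-row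
-- binary search over a 19-entry boundary table (objective: alternative, same asymptotic cost).

-- ===== PORT A =====
-- the 18-branch elif cascade of A's inner loop, verbatim (j in range(a,b) on an int is a ≤ j < b)
def pvCascade (temp : List (List Int)) (j : Int) : List (List Int) :=
  if 0 ≤ j ∧ j < 14 then temp ++ [[0, j]]
  else if 14 ≤ j ∧ j < 23 then temp ++ [[1, j - 14]]
  else if 23 ≤ j ∧ j < 100 then temp ++ [[2, j - 23]]
  else if 100 ≤ j ∧ j < 107 then temp ++ [[3, j - 100]]
  else if 107 ≤ j ∧ j < 115 then temp ++ [[4, j - 107]]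
  else if 115 ≤ j ∧ j < 141 then temp ++ [[5, j - 115]]
  else if 141 ≤ j ∧ j < 162 then temp ++ [[6, j - 141]]
  else if 162 ≤ j ∧ j < 169 then temp ++ [[7, j - 162]]
  else if 169 ≤ j ∧ j < 184 then temp ++ [[8, j - 169]]
  else if 184 ≤ j ∧ j < 223 then temp ++ [[9, j - 184]]
  else if 223 ≤ j ∧ j < 235 then temp ++ [[10, j - 223]]
  else if 235 ≤ j ∧ j < 245 then temp ++ [[11, j - 235]]
  else if 245 ≤ j ∧ j < 254 then temp ++ [[12, j - 245]]
  else if 254 ≤ j ∧ j < 262 then temp ++ [[13, j - 254]]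
  else if 262 ≤ j ∧ j < 273 then temp ++ [[14, j - 262]]
  else if 273 ≤ j ∧ j < 285 then temp ++ [[15, j - 273]]
  else if 285 ≤ j ∧ j < 292 then temp ++ [[16, j - 285]]
  else if 292 ≤ j ∧ j < 303 then temp ++ [[17, j - 292]]
  else temp

def GetTrueLabel (label : List (List Int)) : List (List (List Int)) :=
  let index := label.foldl (fun index s_label =>
    index ++ [((PySem.List.enumerate s_label).filter (fun mj => mj.2 == 1)).map (fun mj => mj.1)]) []
  index.foldl (fun true_label i => true_label ++ [i.foldl pvCascade []]) []

-- ===== PORT B =====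
def pvBounds : List Int := [0, 14, 23, 100, 107, 115, 141, 162, 169, 184, 223, 235, 245, 254, 262, 273, 285, 292, 303]

-- Source B's hand-written bisect_right loop; a.getD is exact here: 0 ≤ lo ≤ mid < hi ≤ a.length at each probe
-- structural fuel recursion (fuel = a.length ≥ number of loop iterations, since hi - lo shrinks each step)
def pvBisectGo (a : List Int) (x : Int) : Nat → Nat → Nat → Nat
  | 0, lo, _ => lo
  | fuel + 1, lo, hi =>
    if lo < hi then
      (if x < a.getD ((lo + hi) / 2) 0
       then pvBisectGo a x fuel lo ((lo + hi) / 2)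
       else pvBisectGo a x fuel ((lo + hi) / 2 + 1) hi)
    else lo

def pvBisectRight (a : List Int) (x : Int) : Nat := pvBisectGo a x a.length 0 a.length

def GetTrueLabel_alt (label : List (List Int)) : List (List (List Int)) :=
  label.foldl (fun true_label s_label =>
    true_label ++ [(PySem.List.enumerate s_label).foldl (fun row jv =>
      if jv.2 == 1 && decide (jv.1 < 303) then
        row ++ [[(pvBisectRight pvBounds jv.1 : Int) - 1,
                 jv.1 - PySem.List.pyGetD pvBounds ((pvBisectRight pvBounds jv.1 : Int) - 1) 0]]
      else row) []]) []

-- ===== PRECONDITION & SPEC =====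
def Spec_GetTrueLabel (label : List (List Int)) (out : List (List (List Int))) : Prop := out = GetTrueLabel_alt label
instance (label : List (List Int)) (out : List (List (List Int))) : Decidable (Spec_GetTrueLabel label out) := by unfold Spec_GetTrueLabel; infer_instance

-- ===== CLAIM (what is proved, stated in full; the proofs are below) =====
def Claim_equal_GetTrueLabel : Prop := ∀ (label : List (List Int)), Dom_GetTrueLabel label → Spec_GetTrueLabel label (GetTrueLabel label)

-- ===== LEMMAS AND PROOFS =====

-- A's cascade only ever appends: its effect is concatenation of a per-index item list
def pvStepA (j : Int) : List (List Int) :=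
  if 0 ≤ j ∧ j < 14 then [[0, j]]
  else if 14 ≤ j ∧ j < 23 then [[1, j - 14]]
  else if 23 ≤ j ∧ j < 100 then [[2, j - 23]]
  else if 100 ≤ j ∧ j < 107 then [[3, j - 100]]
  else if 107 ≤ j ∧ j < 115 then [[4, j - 107]]
  else if 115 ≤ j ∧ j < 141 then [[5, j - 115]]
  else if 141 ≤ j ∧ j < 162 then [[6, j - 141]]
  else if 162 ≤ j ∧ j < 169 then [[7, j - 162]]
  else if 169 ≤ j ∧ j < 184 then [[8, j - 169]]
  else if 184 ≤ j ∧ j < 223 then [[9, j - 184]]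
  else if 223 ≤ j ∧ j < 235 then [[10, j - 223]]
  else if 235 ≤ j ∧ j < 245 then [[11, j - 235]]
  else if 245 ≤ j ∧ j < 254 then [[12, j - 245]]
  else if 254 ≤ j ∧ j < 262 then [[13, j - 254]]
  else if 262 ≤ j ∧ j < 273 then [[14, j - 262]]
  else if 273 ≤ j ∧ j < 285 then [[15, j - 273]]
  else if 285 ≤ j ∧ j < 292 then [[16, j - 285]]
  else if 292 ≤ j ∧ j < 303 then [[17, j - 292]]
  else []

-- B's per-index item list (what B appends when the bit is set and j < 303)
def pvStepB (j : Int) : List (List Int) :=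
  if j < 303 then
    [[(pvBisectRight pvBounds j : Int) - 1,
      j - PySem.List.pyGetD pvBounds ((pvBisectRight pvBounds j : Int) - 1) 0]]
  else []

theorem pvCascade_eq_append (temp : List (List Int)) (j : Int) :
    pvCascade temp j = temp ++ pvStepA j := by
  simp only [pvCascade, pvStepA, apply_ite (fun l => temp ++ l), List.append_nil]

-- the heart of the equivalence: for every nonnegative index the cascade's item list
-- equals the binary-search item list
set_option maxRecDepth 100000 in
theorem pvStep_eq_of_lt (n : Nat) (h : n < 303) : pvStepA (n : Int) = pvStepB (n : Int) := by
  revert n h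
  decide

theorem pvStep_eq (j : Int) (hj : 0 ≤ j) : pvStepA j = pvStepB j := by
  by_cases h : j < 303
  · have hn : j.toNat < 303 := by omega
    have := pvStep_eq_of_lt j.toNat hn
    rwa [Int.toNat_of_nonneg hj] at this
  · unfold pvStepA pvStepB
    rw [if_neg (by omega)]
    rw [if_neg (by omega)]
    rw [if_neg (by omega)]
    rw [if_neg (by omega)]
    rw [if_neg (by omega)]
    rw [if_neg (by omega)]
    rw [if_neg (by omega)]
    rw [if_neg (by omega)]
    rw [if_neg (by omega)]
    rw [if_neg (by omega)]
    rw [if_neg (by omega)]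
    rw [if_neg (by omega)]
    rw [if_neg (by omega)]
    rw [if_neg (by omega)]
    rw [if_neg (by omega)]
    rw [if_neg (by omega)]
    rw [if_neg (by omega)]
    rw [if_neg (by omega)]
    rw [if_neg (by omega)]

theorem pvFlatMap_filter {α β : Type} (p : α → Bool) (f : α → List β) (l : List α) :
    (l.filter p).flatMap f = l.flatMap (fun x => if p x then f x else []) := by
  induction l with
  | nil => rfl
  | cons x xs ih =>
      by_cases h : p x <;> simp [h, ih]

theorem pvRow_eq (s_label : List Int) :
    (((PySem.List.enumerate s_label).filter (fun mj => mj.2 == 1)).map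
        (fun mj : Int × Int => mj.1)).foldl pvCascade []
      = (PySem.List.enumerate s_label).foldl (fun row jv =>
          if jv.2 == 1 && decide (jv.1 < 303) then
            row ++ [[(pvBisectRight pvBounds jv.1 : Int) - 1,
                     jv.1 - PySem.List.pyGetD pvBounds ((pvBisectRight pvBounds jv.1 : Int) - 1) 0]]
          else row) [] := by
  have hA : ∀ (l : List Int) (acc : List (List Int)),
      l.foldl pvCascade acc = acc ++ l.flatMap pvStepA := by
    intro l acc
    have : l.foldl pvCascade acc = l.foldl (fun temp j => temp ++ pvStepA j) acc := by
      exact List.foldl_ext _ _ acc (fun a b _ => pvCascade_eq_append a b)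
    rw [this, PySem.List.foldl_append_eq_flatMap]
  have hB : (PySem.List.enumerate s_label).foldl (fun row jv =>
          if jv.2 == 1 && decide (jv.1 < 303) then
            row ++ [[(pvBisectRight pvBounds jv.1 : Int) - 1,
                     jv.1 - PySem.List.pyGetD pvBounds ((pvBisectRight pvBounds jv.1 : Int) - 1) 0]]
          else row) []
      = (PySem.List.enumerate s_label).flatMap
          (fun jv : Int × Int => if jv.2 == 1 then pvStepB jv.1 else []) := by
    have : ∀ (l : List (Int × Int)) (acc : List (List Int)),
        l.foldl (fun row jv =>
          if jv.2 == 1 && decide (jv.1 < 303) then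
            row ++ [[(pvBisectRight pvBounds jv.1 : Int) - 1,
                     jv.1 - PySem.List.pyGetD pvBounds ((pvBisectRight pvBounds jv.1 : Int) - 1) 0]]
          else row) acc
          = acc ++ l.flatMap (fun jv : Int × Int => if jv.2 == 1 then pvStepB jv.1 else []) := by
      intro l acc
      induction l generalizing acc with
      | nil => simp
      | cons p ps ih =>
          simp only [List.foldl_cons, List.flatMap_cons, ih]
          by_cases h1 : p.2 == 1 <;> by_cases h2 : p.1 < 303 <;>
            simp [pvStepB, h1, h2]
    exact this _ []
  rw [hA, hB, List.flatMap_map, pvFlatMap_filter]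
  apply List.flatMap_congr
  intro jv hjv
  have h0 : 0 ≤ jv.1 := by
    rcases (PySem.List.mem_enumerate_iff s_label 0 jv).mp hjv with ⟨k, hk, hp⟩
    simp [hp]
  by_cases h1 : jv.2 == 1 <;> simp [h1, pvStep_eq jv.1 h0]

-- ===== VERDICT (by name: the statement is the Claim_ definition above) =====
theorem GetTrueLabel_spec : Claim_equal_GetTrueLabel := by
  intro label _
  unfold Spec_GetTrueLabel GetTrueLabel GetTrueLabel_alt
  simp only [PySem.List.foldl_append_singleton_eq_map, List.map_map, List.nil_append]
  apply List.map_congr_left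
  intro s_label _
  exact pvRow_eq s_label
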